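-- pv_equiv track=rewrite | github.com/ginoagostinelli/jax | jax/interpreters/flattree.py | _axes_for_leaf
-- ===== SOURCE A (Python) =====
-- from typing import (
--     Any, Callable, Dict, Iterable, Iterator, List, Tuple, TypeVar,
-- )
--
-- LeafShapes = List[List[Tuple[int, ...]]]
--
-- def _axes_for_leaf(
--     leafshapes: LeafShapes, coords: Tuple[int, ...], axes: Tuple[int, ...],
-- ) -> Tuple[int, ...]:
--   out_axes: List[int] = []
--   leaf_axis = 0
--   for axis, coord in enumerate(coords):
--     leaf_ndim = len(leafshapes[axis][coord])
--     if axis in axes: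
--       out_axes.extend(range(leaf_axis, leaf_axis + leaf_ndim))
--     leaf_axis += leaf_ndim
--   return tuple(out_axes)
-- ===== SOURCE B (Python) =====
-- def _axes_for_leaf(leafshapes, coords, axes):
--   ndims = [len(leafshapes[axis][coord]) for axis, coord in enumerate(coords)]
--   offsets = [0]
--   for n in ndims:
--     offsets.append(offsets[-1] + n)
--   return tuple(i for axis in range(len(coords)) if axis in axes
--                for i in range(offsets[axis], offsets[axis + 1]))
-- ===== Notes on version B (the rewrite author's own statement) =====
-- stated objective: alternative
-- what changed: Replaces A's single interleaved accumulate-and-select loop with three separate passes: a table of per-axis leaf ndims, a cumulative-offset table, and a selection pass that concatenates the offset ranges of the selected axes.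
import Mathlib
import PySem

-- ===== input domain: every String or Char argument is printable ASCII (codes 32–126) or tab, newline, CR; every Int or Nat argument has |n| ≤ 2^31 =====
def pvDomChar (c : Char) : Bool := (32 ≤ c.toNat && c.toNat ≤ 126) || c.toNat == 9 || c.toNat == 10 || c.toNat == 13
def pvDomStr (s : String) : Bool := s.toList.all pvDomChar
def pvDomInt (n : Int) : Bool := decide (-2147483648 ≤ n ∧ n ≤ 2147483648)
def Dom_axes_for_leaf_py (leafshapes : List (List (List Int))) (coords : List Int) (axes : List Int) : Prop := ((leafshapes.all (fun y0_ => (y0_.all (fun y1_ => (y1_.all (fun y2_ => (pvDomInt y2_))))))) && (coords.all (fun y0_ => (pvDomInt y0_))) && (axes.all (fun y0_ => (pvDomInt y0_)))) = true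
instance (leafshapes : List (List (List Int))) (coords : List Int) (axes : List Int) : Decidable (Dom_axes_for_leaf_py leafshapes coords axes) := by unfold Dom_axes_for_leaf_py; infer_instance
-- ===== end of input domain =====

-- B replaces A's single interleaved accumulate-and-select loop by three passes: an
-- ndims table, a cumulative-offset table, and a selection pass over the offset table
-- (objective: alternative decomposition, same cost).

-- ===== PORT A =====
-- len(leafshapes[axis][coord]); under Pre_ both pyGet? succeed, the getD [] default
-- is only reached outside Pre_ (where Python raises IndexError).
def pyNdim (leafshapes : List (List (List Int))) (axis : Nat) (coord : Int) : Int :=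
  ((PySem.List.pyGet? ((PySem.List.pyGet? leafshapes (axis : Int)).getD []) coord).getD []).length

-- the loop of A: state (out_axes inside the accumulator `out`, leaf_axis), one step per coord
def goA (leafshapes : List (List (List Int))) (axes : List Int) :
    List Int → Nat → Int → List Int → List Int
  | [], _, _, out => out
  | c :: cs, axis, leafAxis, out =>
      let nd := pyNdim leafshapes axis c
      let out' := if (axis : Int) ∈ axes then out ++ PySem.List.pyRange leafAxis (leafAxis + nd) 1 else out
      goA leafshapes axes cs (axis + 1) (leafAxis + nd) out'

def axes_for_leaf_py (leafshapes : List (List (List Int))) (coords : List Int) (axes : List Int) : List Int :=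
  goA leafshapes axes coords 0 0 []

-- ===== PORT B =====
def axes_for_leaf_py_alt (leafshapes : List (List (List Int))) (coords : List Int) (axes : List Int) : List Int :=
  let ndims : List Int := coords.zipIdx.map (fun p => pyNdim leafshapes p.2 p.1)
  let offsets : List Int := ndims.foldl (fun acc n => acc ++ [acc.getLast?.getD 0 + n]) [0]
  (List.range coords.length).flatMap (fun (axis : Nat) =>
    if (axis : Int) ∈ axes then PySem.List.pyRange (offsets.getD axis 0) (offsets.getD (axis + 1) 0) 1 else [])

-- ===== PRECONDITION & SPEC =====
-- Pre_ excludes exactly the inputs on which A raises IndexError: some axis/coord with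
-- leafshapes[axis] or leafshapes[axis][coord] out of range.
def Pre_axes_for_leaf_py (leafshapes : List (List (List Int))) (coords : List Int) (axes : List Int) : Prop :=
  (coords.zipIdx.all (fun p =>
    match leafshapes[p.2]? with
    | some row => decide (-(row.length : Int) ≤ p.1 ∧ p.1 < row.length)
    | none => false)) = true

instance (leafshapes : List (List (List Int))) (coords : List Int) (axes : List Int) : Decidable (Pre_axes_for_leaf_py leafshapes coords axes) := by unfold Pre_axes_for_leaf_py; infer_instance

def pvWitness_axes_for_leaf_py : List (List (List Int)) × List Int × List Int :=
  ([[[2, 3], [4]], [[5]]], [0, 0], [1])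

def Spec_axes_for_leaf_py (leafshapes : List (List (List Int))) (coords : List Int) (axes : List Int) (out : List Int) : Prop := out = axes_for_leaf_py_alt leafshapes coords axes
instance (leafshapes : List (List (List Int))) (coords : List Int) (axes : List Int) (out : List Int) : Decidable (Spec_axes_for_leaf_py leafshapes coords axes out) := by unfold Spec_axes_for_leaf_py; infer_instance

-- ===== CLAIM (what is proved, stated in full; the proofs are below) =====
def Claim_equal_axes_for_leaf_py : Prop := ∀ (leafshapes : List (List (List Int))) (coords : List Int) (axes : List Int), Dom_axes_for_leaf_py leafshapes coords axes → Pre_axes_for_leaf_py leafshapes coords axes → Spec_axes_for_leaf_py leafshapes coords axes (axes_for_leaf_py leafshapes coords axes)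

-- ===== LEMMAS AND PROOFS =====

-- common reference form: emit the range of each selected axis, walking the ndims table
def specSel (axes : List Int) : List Int → Nat → Int → List Int
  | [], _, _ => []
  | d :: ds, axis, off =>
      (if (axis : Int) ∈ axes then PySem.List.pyRange off (off + d) 1 else []) ++
        specSel axes ds (axis + 1) (off + d)

-- the per-axis ndims table, starting at axis k
def ndimsFrom (leafshapes : List (List (List Int))) : List Int → Nat → List Int
  | [], _ => []
  | c :: cs, k => pyNdim leafshapes k c :: ndimsFrom leafshapes cs (k + 1)

theorem goA_eq_specSel (leafshapes : List (List (List Int))) (axes : List Int) :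
    ∀ (cs : List Int) (axis : Nat) (off : Int) (out : List Int),
      goA leafshapes axes cs axis off out = out ++ specSel axes (ndimsFrom leafshapes cs axis) axis off := by
  intro cs
  induction cs with
  | nil => intro axis off out; simp [goA, ndimsFrom, specSel]
  | cons c cs ih =>
      intro axis off out
      simp only [goA, ndimsFrom, specSel, ih]
      split <;> simp

theorem zipIdx_map_eq_ndimsFrom (leafshapes : List (List (List Int))) :
    ∀ (cs : List Int) (k : Nat),
      (cs.zipIdx k).map (fun p => pyNdim leafshapes p.2 p.1) = ndimsFrom leafshapes cs k := by
  intro cs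
  induction cs with
  | nil => intro k; simp [ndimsFrom]
  | cons c cs ih => intro k; simp [List.zipIdx_cons, ndimsFrom, ih]

theorem offsets_foldl_eq_scanl :
    ∀ (ds : List Int) (ys : List Int) (v : Int),
      ds.foldl (fun (acc : List Int) (n : Int) => acc ++ [acc.getLast?.getD 0 + n]) (ys ++ [v]) =
        ys ++ List.scanl (· + ·) v ds := by
  intro ds
  induction ds with
  | nil => intro ys v; simp
  | cons d ds ih =>
      intro ys v
      simp only [List.foldl_cons]
      have h1 : (ys ++ [v]).getLast?.getD 0 = v := by simp
      rw [h1, ih (ys ++ [v]) (v + d)]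
      simp

theorem range_flatMap_eq_specSel (axes : List Int) :
    ∀ (ds : List Int) (axis0 : Nat) (v : Int),
      (List.range ds.length).flatMap (fun a =>
        if ((a + axis0 : Nat) : Int) ∈ axes then
          PySem.List.pyRange ((List.scanl (· + ·) v ds).getD a 0) ((List.scanl (· + ·) v ds).getD (a + 1) 0) 1
        else []) = specSel axes ds axis0 v := by
  intro ds
  induction ds with
  | nil => intro axis0 v; simp [specSel]
  | cons d ds ih =>
      intro axis0 v
      simp only [List.length_cons]
      rw [List.range_succ_eq_map]
      simp only [List.flatMap_cons, List.flatMap_map]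
      have hfun : (fun a : Nat =>
          (fun a : Nat => if ((a + axis0 : Nat) : Int) ∈ axes then
            PySem.List.pyRange ((List.scanl (· + ·) v (d :: ds)).getD a 0) ((List.scanl (· + ·) v (d :: ds)).getD (a + 1) 0) 1
          else []) a.succ) =
          (fun a : Nat => if ((a + (axis0 + 1) : Nat) : Int) ∈ axes then
            PySem.List.pyRange ((List.scanl (· + ·) (v + d) ds).getD a 0) ((List.scanl (· + ·) (v + d) ds).getD (a + 1) 0) 1
          else []) := by
        funext a
        simp only [Nat.succ_eq_add_one, List.scanl_cons, List.getD_cons_succ]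
        have he : (a + 1 + axis0 : Nat) = (a + (axis0 + 1) : Nat) := by omega
        rw [he]
      rw [hfun, ih (axis0 + 1) (v + d)]
      simp [specSel]

theorem alt_eq_specSel (leafshapes : List (List (List Int))) (coords : List Int) (axes : List Int) :
    axes_for_leaf_py_alt leafshapes coords axes = specSel axes (ndimsFrom leafshapes coords 0) 0 0 := by
  simp only [axes_for_leaf_py_alt]
  rw [zipIdx_map_eq_ndimsFrom]
  have hoff := offsets_foldl_eq_scanl (ndimsFrom leafshapes coords 0) [] 0
  simp only [List.nil_append] at hoff
  rw [hoff]
  have hlen : coords.length = (ndimsFrom leafshapes coords 0).length := by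
    have : ∀ (cs : List Int) (k : Nat), cs.length = (ndimsFrom leafshapes cs k).length := by
      intro cs
      induction cs with
      | nil => intro k; simp [ndimsFrom]
      | cons c cs ih => intro k; simp [ndimsFrom, ih (k + 1)]
    exact this coords 0
  rw [hlen]
  have := range_flatMap_eq_specSel axes (ndimsFrom leafshapes coords 0) 0 0
  simpa using this

-- ===== VERDICT (by name: the statement is the Claim_ definition above) =====
theorem axes_for_leaf_py_spec : Claim_equal_axes_for_leaf_py := by
  intro leafshapes coords axes _ _
  unfold Spec_axes_for_leaf_py
  rw [alt_eq_specSel]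
  unfold axes_for_leaf_py
  rw [goA_eq_specSel]
  simp
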